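-- pv_equiv track=rewrite | github.com/rheda-rifki/runtrack-python | jour04/job14/main.py | my_long_word
-- ===== SOURCE A (Python) =====
-- def est_separateur(caractere):
--     separateurs = [' ', ',', '.', ';', ':', '!', '?']
--     return caractere in separateurs
--
-- def my_long_word(longueur_min, phrase):
--     mot_actuel = ""
--     mots_longueur_min = []
--
--     for caractere in phrase:
--         if not est_separateur(caractere):
--             mot_actuel += caractere
--         elif len(mot_actuel) > longueur_min:
--             mots_longueur_min.append(mot_actuel)
--             mot_actuel = ""
--         else:
--             mot_actuel = ""
--
--     if len(mot_actuel) > longueur_min: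
--         mots_longueur_min.append(mot_actuel)
--
--     phrase_sortie = ' '.join(mots_longueur_min)
--
--     return phrase_sortie
-- ===== SOURCE B (Python) =====
-- import re
--
-- def my_long_word(longueur_min, phrase):
--     tokens = re.split(r'[ ,.;:!?]', phrase)
--     return ' '.join(w for w in tokens if len(w) > longueur_min)
-- ===== Notes on version B (the rewrite author's own statement) =====
-- stated objective: idiomatic
-- what changed: Replaces the char-by-char accumulator loop and est_separateur helper with a single re.split on the separator class followed by a filter-and-join pipeline.
import Mathlib
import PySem

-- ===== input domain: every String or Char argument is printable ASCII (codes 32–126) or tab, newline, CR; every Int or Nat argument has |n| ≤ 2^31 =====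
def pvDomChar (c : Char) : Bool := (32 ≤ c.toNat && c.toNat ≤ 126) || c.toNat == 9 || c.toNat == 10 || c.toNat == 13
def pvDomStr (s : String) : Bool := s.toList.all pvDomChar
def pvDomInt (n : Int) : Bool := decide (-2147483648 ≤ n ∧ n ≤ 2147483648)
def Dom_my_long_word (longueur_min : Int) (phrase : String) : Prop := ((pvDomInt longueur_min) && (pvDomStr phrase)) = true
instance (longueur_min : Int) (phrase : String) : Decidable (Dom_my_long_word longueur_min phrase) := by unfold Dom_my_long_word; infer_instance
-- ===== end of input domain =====

-- B replaces A's char-by-char accumulator loop with a split-into-tokens / filter / join pipeline (re.split); same result, idiomatic.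

-- ===== PORT A =====
def est_separateur (caractere : Char) : Bool :=
  [' ', ',', '.', ';', ':', '!', '?'].contains caractere

def my_long_word (longueur_min : Int) (phrase : String) : String :=
  let st := phrase.toList.foldl
    (fun (st : String × List String) caractere =>
      if !est_separateur caractere then (st.1.push caractere, st.2)
      else if PySem.Str.len st.1 > longueur_min then ("", st.2 ++ [st.1])
      else ("", st.2))
    ("", [])
  let mots := if PySem.Str.len st.1 > longueur_min then st.2 ++ [st.1] else st.2
  PySem.Str.join " " mots

-- ===== PORT B =====
-- hand port of re.split(r'[ ,.;:!?]', phrase): the token list, empties at separator boundaries kept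
def splitSeps : List Char → List (List Char)
  | [] => [[]]
  | c :: rest =>
    if est_separateur c then [] :: splitSeps rest
    else (c :: (splitSeps rest).headI) :: (splitSeps rest).tail

def my_long_word_alt (longueur_min : Int) (phrase : String) : String :=
  PySem.Str.join " "
    (((splitSeps phrase.toList).filter (fun t => (t.length : Int) > longueur_min)).map String.ofList)
-- ===== PRECONDITION & SPEC =====
def Spec_my_long_word (longueur_min : Int) (phrase : String) (out : String) : Prop := out = my_long_word_alt longueur_min phrase
instance (longueur_min : Int) (phrase : String) (out : String) : Decidable (Spec_my_long_word longueur_min phrase out) := by unfold Spec_my_long_word; infer_instance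

-- ===== CLAIM (what is proved, stated in full; the proofs are below) =====
def Claim_equal_my_long_word : Prop := ∀ (longueur_min : Int) (phrase : String), Dom_my_long_word longueur_min phrase → Spec_my_long_word longueur_min phrase (my_long_word longueur_min phrase)

-- ===== LEMMAS AND PROOFS =====

theorem splitSeps_ne_nil (cs : List Char) : splitSeps cs ≠ [] := by
  cases cs with
  | nil => simp [splitSeps]
  | cons c rest => simp only [splitSeps]; split <;> simp

-- A's loop with accumulator cur and output acc equals: filter-and-join of splitSeps with cur prepended to its first token.
theorem loop_eq (m : Int) (cs : List Char) : ∀ (cur : String) (acc : List String),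
    (let st := cs.foldl
        (fun (st : String × List String) c =>
          if !est_separateur c then (st.1.push c, st.2)
          else if PySem.Str.len st.1 > m then ("", st.2 ++ [st.1])
          else ("", st.2))
        (cur, acc)
     let mots := if PySem.Str.len st.1 > m then st.2 ++ [st.1] else st.2
     PySem.Str.join " " mots)
    = PySem.Str.join " "
        (acc ++ (((cur.toList ++ (splitSeps cs).headI) :: (splitSeps cs).tail).filter
            (fun t => (t.length : Int) > m)).map String.ofList) := by
  induction cs with
  | nil =>
    intro cur acc
    simp only [List.foldl_nil, splitSeps, List.headI, List.tail, List.filter_cons,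
      List.filter_nil, List.append_nil]
    by_cases hk : PySem.Str.len cur > m
    · have h : decide ((cur.toList.length : Int) > m) = true := by
        simp [PySem.Str.len_eq] at hk ⊢; omega
      rw [if_pos hk, h]
      simp [String.ofList_toList]
    · have h : decide ((cur.toList.length : Int) > m) = false := by
        simp [PySem.Str.len_eq] at hk ⊢; omega
      rw [if_neg hk, h]
      simp
  | cons c rest ih =>
    intro cur acc
    obtain ⟨t, ts, h2⟩ : ∃ t ts, splitSeps rest = t :: ts := by
      cases h : splitSeps rest with
      | nil => exact absurd h (splitSeps_ne_nil rest)
      | cons a b => exact ⟨a, b, rfl⟩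
    by_cases hs : est_separateur c
    · simp only [List.foldl_cons, hs, Bool.not_true, Bool.false_eq_true, if_false]
      by_cases hk : PySem.Str.len cur > m
      · rw [if_pos hk, ih "" (acc ++ [cur])]
        have h : m < (cur.length : Int) := by simp [PySem.Str.len_eq] at hk; omega
        simp [splitSeps, hs, h2, List.filter_cons, h, String.ofList_toList, List.append_assoc]
      · rw [if_neg hk, ih "" acc]
        have h : ¬ m < (cur.length : Int) := by simp [PySem.Str.len_eq] at hk; omega
        simp [splitSeps, hs, h2, List.filter_cons, h]
    · simp only [List.foldl_cons, hs, Bool.not_false, if_true]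
      rw [ih (cur.push c) acc]
      simp [splitSeps, hs, h2, String.toList_push, List.append_assoc]

-- ===== VERDICT (by name: the statement is the Claim_ definition above) =====
theorem my_long_word_spec : Claim_equal_my_long_word := by
  intro m phrase _
  show my_long_word m phrase = my_long_word_alt m phrase
  unfold my_long_word my_long_word_alt
  rw [loop_eq m phrase.toList "" []]
  obtain ⟨t, ts, h⟩ : ∃ t ts, splitSeps phrase.toList = t :: ts := by
    cases h : splitSeps phrase.toList with
    | nil => exact absurd h (splitSeps_ne_nil phrase.toList)
    | cons a b => exact ⟨a, b, rfl⟩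
  simp [h]
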